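-- pv_equiv track=rewrite | github.com/RobotFleet-HQ/security-orchestra | ats-sizing-agent/ats_sizing.py | get_conductor_size
-- ===== SOURCE A (Python) =====
-- CONDUCTOR_TABLE = {
--     100: "1 AWG",
--     150: "2/0 AWG",
--     200: "3/0 AWG",
--     225: "4/0 AWG",
--     260: "350 kcmil",
--     400: "600 kcmil",
--     600: "2x 350 kcmil",
--     800: "2x 500 kcmil",
-- }
--
-- def get_conductor_size(rated_amps):
--     if rated_amps in CONDUCTOR_TABLE:
--         return CONDUCTOR_TABLE[rated_amps]
--     elif rated_amps >= 1000:
--         return "Paralleled sets required — consult NEC 310.10(H) for paralleled conductor sizing"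
--     else:
--         # Find next largest in table
--         for key in sorted(CONDUCTOR_TABLE.keys()):
--             if key >= rated_amps:
--                 return CONDUCTOR_TABLE[key]
--         return "Paralleled sets required — consult NEC 310.10(H)"
-- ===== SOURCE B (Python) =====
-- CONDUCTOR_TABLE = {
--     100: "1 AWG",
--     150: "2/0 AWG",
--     200: "3/0 AWG",
--     225: "4/0 AWG",
--     260: "350 kcmil",
--     400: "600 kcmil",
--     600: "2x 350 kcmil",
--     800: "2x 500 kcmil",
-- }
--
-- SORTED_KEYS = sorted(CONDUCTOR_TABLE)
--
--
-- def get_conductor_size(rated_amps):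
--     # All table keys are < 1000, so amps >= 1000 can never match a key.
--     if rated_amps >= 1000:
--         return "Paralleled sets required — consult NEC 310.10(H) for paralleled conductor sizing"
--     # Binary search for the first key >= rated_amps (an exact key finds itself).
--     lo, hi = 0, len(SORTED_KEYS)
--     while lo < hi:
--         mid = (lo + hi) // 2
--         if SORTED_KEYS[mid] < rated_amps:
--             lo = mid + 1
--         else:
--             hi = mid
--     if lo < len(SORTED_KEYS):
--         return CONDUCTOR_TABLE[SORTED_KEYS[lo]]
--     return "Paralleled sets required — consult NEC 310.10(H)"
-- ===== Notes on version B (the rewrite author's own statement) =====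
-- stated objective: idiomatic
-- what changed: Replaces A's dict-membership test followed by a per-call sort and linear scan of the keys with one precomputed sorted key list and a hand-written binary search for the first key >= rated_amps (an exact key finds itself, so the membership branch disappears); the paralleled-sets branch is hoisted first, which is equivalent because every table key lies below that cutoff.
import Mathlib
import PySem

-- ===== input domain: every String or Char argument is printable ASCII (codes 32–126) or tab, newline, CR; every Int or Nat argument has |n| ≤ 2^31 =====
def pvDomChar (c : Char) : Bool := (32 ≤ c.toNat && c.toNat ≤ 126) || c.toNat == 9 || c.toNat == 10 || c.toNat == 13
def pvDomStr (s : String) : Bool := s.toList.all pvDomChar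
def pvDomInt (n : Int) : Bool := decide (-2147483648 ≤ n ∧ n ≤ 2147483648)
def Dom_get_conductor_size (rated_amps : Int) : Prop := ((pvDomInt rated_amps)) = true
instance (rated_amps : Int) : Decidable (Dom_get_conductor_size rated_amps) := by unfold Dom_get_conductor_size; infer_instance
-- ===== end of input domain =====

-- B replaces A's membership test plus linear scan over the sorted keys by one hand-written
-- binary search on the precomputed sorted key list (an exact key finds itself); same return
-- value everywhere (objective: alternative/idiomatic, not claimed faster).

-- ===== PORT A =====
def pvTable : PySem.Dict Int String := PySem.Dict.ofList
  [(100, "1 AWG"), (150, "2/0 AWG"), (200, "3/0 AWG"), (225, "4/0 AWG"),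
   (260, "350 kcmil"), (400, "600 kcmil"), (600, "2x 350 kcmil"), (800, "2x 500 kcmil")]

-- the for-loop over sorted(CONDUCTOR_TABLE.keys()); getD "" is exact here: every looked-up
-- key comes from the table itself, so Python's dict[key] cannot raise.
def pvFindLoop (rated_amps : Int) : List Int → String
  | [] => "Paralleled sets required — consult NEC 310.10(H)"
  | k :: ks =>
    if k ≥ rated_amps then pvTable.getD k "" else pvFindLoop rated_amps ks

def get_conductor_size (rated_amps : Int) : String :=
  if pvTable.contains rated_amps then pvTable.getD rated_amps ""
  else if rated_amps ≥ 1000 then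
    "Paralleled sets required — consult NEC 310.10(H) for paralleled conductor sizing"
  else pvFindLoop rated_amps (PySem.List.sorted pvTable.keys (fun x => x) false)

-- ===== PORT B =====
def pvSortedKeys : List Int := PySem.List.sorted pvTable.keys (fun x => x) false

-- the while-loop; lo, hi are Nat (Python keeps them in [0, len]); getD 0 is exact: mid < hi ≤ len;
-- fuel is a totality guard only (hi - lo shrinks every iteration, so hi - lo iterations suffice).
def pvBisectGo (rated_amps : Int) : Nat → Nat → Nat → Nat
  | 0, lo, _ => lo
  | fuel + 1, lo, hi =>
    if lo < hi then
      let mid := (lo + hi) / 2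
      if pvSortedKeys.getD mid 0 < rated_amps then pvBisectGo rated_amps fuel (mid + 1) hi
      else pvBisectGo rated_amps fuel lo mid
    else lo

def get_conductor_size_alt (rated_amps : Int) : String :=
  if rated_amps ≥ 1000 then
    "Paralleled sets required — consult NEC 310.10(H) for paralleled conductor sizing"
  else
    let lo := pvBisectGo rated_amps pvSortedKeys.length 0 pvSortedKeys.length
    if lo < pvSortedKeys.length then pvTable.getD (pvSortedKeys.getD lo 0) ""
    else "Paralleled sets required — consult NEC 310.10(H)"

-- ===== PRECONDITION & SPEC =====
def Spec_get_conductor_size (rated_amps : Int) (out : String) : Prop := out = get_conductor_size_alt rated_amps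
instance (rated_amps : Int) (out : String) : Decidable (Spec_get_conductor_size rated_amps out) := by unfold Spec_get_conductor_size; infer_instance

-- ===== CLAIM (what is proved, stated in full; the proofs are below) =====
def Claim_equal_get_conductor_size : Prop := ∀ (rated_amps : Int), Dom_get_conductor_size rated_amps → Spec_get_conductor_size rated_amps (get_conductor_size rated_amps)

-- ===== LEMMAS AND PROOFS =====
lemma pvSortedKeys_eq : pvSortedKeys = [100, 150, 200, 225, 260, 400, 600, 800] := by
  decide

lemma pvBisect_step (r : Int) (f lo hi mid : Nat) (h : lo < hi) (hm : (lo + hi) / 2 = mid) :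
    pvBisectGo r (f + 1) lo hi =
      if pvSortedKeys.getD mid 0 < r then pvBisectGo r f (mid + 1) hi
      else pvBisectGo r f lo mid := by
  simp [pvBisectGo, h, hm]

lemma pvBisect_done (r : Int) (f lo hi : Nat) (h : ¬ lo < hi) : pvBisectGo r f lo hi = lo := by
  cases f <;> simp [pvBisectGo, h]

lemma pvBisect_eval (r : Int) :
    pvBisectGo r 8 0 8 =
      if r ≤ 100 then 0 else if r ≤ 150 then 1 else if r ≤ 200 then 2
      else if r ≤ 225 then 3 else if r ≤ 260 then 4 else if r ≤ 400 then 5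
      else if r ≤ 600 then 6 else if r ≤ 800 then 7 else 8 := by
  split_ifs
  · rw [pvBisect_step r 7 0 8 4 (by norm_num) rfl, show pvSortedKeys.getD 4 0 = 260 from rfl, if_neg (by omega)]
    rw [pvBisect_step r 6 0 4 2 (by norm_num) rfl, show pvSortedKeys.getD 2 0 = 200 from rfl, if_neg (by omega)]
    rw [pvBisect_step r 5 0 2 1 (by norm_num) rfl, show pvSortedKeys.getD 1 0 = 150 from rfl, if_neg (by omega)]
    rw [pvBisect_step r 4 0 1 0 (by norm_num) rfl, show pvSortedKeys.getD 0 0 = 100 from rfl, if_neg (by omega)]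
    rw [pvBisect_done r 4 0 0 (by norm_num)]
  · rw [pvBisect_step r 7 0 8 4 (by norm_num) rfl, show pvSortedKeys.getD 4 0 = 260 from rfl, if_neg (by omega)]
    rw [pvBisect_step r 6 0 4 2 (by norm_num) rfl, show pvSortedKeys.getD 2 0 = 200 from rfl, if_neg (by omega)]
    rw [pvBisect_step r 5 0 2 1 (by norm_num) rfl, show pvSortedKeys.getD 1 0 = 150 from rfl, if_neg (by omega)]
    rw [pvBisect_step r 4 0 1 0 (by norm_num) rfl, show pvSortedKeys.getD 0 0 = 100 from rfl, if_pos (by omega)]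
    rw [pvBisect_done r 4 1 1 (by norm_num)]
  · rw [pvBisect_step r 7 0 8 4 (by norm_num) rfl, show pvSortedKeys.getD 4 0 = 260 from rfl, if_neg (by omega)]
    rw [pvBisect_step r 6 0 4 2 (by norm_num) rfl, show pvSortedKeys.getD 2 0 = 200 from rfl, if_neg (by omega)]
    rw [pvBisect_step r 5 0 2 1 (by norm_num) rfl, show pvSortedKeys.getD 1 0 = 150 from rfl, if_pos (by omega)]
    rw [pvBisect_done r 5 2 2 (by norm_num)]
  · rw [pvBisect_step r 7 0 8 4 (by norm_num) rfl, show pvSortedKeys.getD 4 0 = 260 from rfl, if_neg (by omega)]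
    rw [pvBisect_step r 6 0 4 2 (by norm_num) rfl, show pvSortedKeys.getD 2 0 = 200 from rfl, if_pos (by omega)]
    rw [pvBisect_step r 5 3 4 3 (by norm_num) rfl, show pvSortedKeys.getD 3 0 = 225 from rfl, if_neg (by omega)]
    rw [pvBisect_done r 5 3 3 (by norm_num)]
  · rw [pvBisect_step r 7 0 8 4 (by norm_num) rfl, show pvSortedKeys.getD 4 0 = 260 from rfl, if_neg (by omega)]
    rw [pvBisect_step r 6 0 4 2 (by norm_num) rfl, show pvSortedKeys.getD 2 0 = 200 from rfl, if_pos (by omega)]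
    rw [pvBisect_step r 5 3 4 3 (by norm_num) rfl, show pvSortedKeys.getD 3 0 = 225 from rfl, if_pos (by omega)]
    rw [pvBisect_done r 5 4 4 (by norm_num)]
  · rw [pvBisect_step r 7 0 8 4 (by norm_num) rfl, show pvSortedKeys.getD 4 0 = 260 from rfl, if_pos (by omega)]
    rw [pvBisect_step r 6 5 8 6 (by norm_num) rfl, show pvSortedKeys.getD 6 0 = 600 from rfl, if_neg (by omega)]
    rw [pvBisect_step r 5 5 6 5 (by norm_num) rfl, show pvSortedKeys.getD 5 0 = 400 from rfl, if_neg (by omega)]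
    rw [pvBisect_done r 5 5 5 (by norm_num)]
  · rw [pvBisect_step r 7 0 8 4 (by norm_num) rfl, show pvSortedKeys.getD 4 0 = 260 from rfl, if_pos (by omega)]
    rw [pvBisect_step r 6 5 8 6 (by norm_num) rfl, show pvSortedKeys.getD 6 0 = 600 from rfl, if_neg (by omega)]
    rw [pvBisect_step r 5 5 6 5 (by norm_num) rfl, show pvSortedKeys.getD 5 0 = 400 from rfl, if_pos (by omega)]
    rw [pvBisect_done r 5 6 6 (by norm_num)]
  · rw [pvBisect_step r 7 0 8 4 (by norm_num) rfl, show pvSortedKeys.getD 4 0 = 260 from rfl, if_pos (by omega)]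
    rw [pvBisect_step r 6 5 8 6 (by norm_num) rfl, show pvSortedKeys.getD 6 0 = 600 from rfl, if_pos (by omega)]
    rw [pvBisect_step r 5 7 8 7 (by norm_num) rfl, show pvSortedKeys.getD 7 0 = 800 from rfl, if_neg (by omega)]
    rw [pvBisect_done r 5 7 7 (by norm_num)]
  · rw [pvBisect_step r 7 0 8 4 (by norm_num) rfl, show pvSortedKeys.getD 4 0 = 260 from rfl, if_pos (by omega)]
    rw [pvBisect_step r 6 5 8 6 (by norm_num) rfl, show pvSortedKeys.getD 6 0 = 600 from rfl, if_pos (by omega)]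
    rw [pvBisect_step r 5 7 8 7 (by norm_num) rfl, show pvSortedKeys.getD 7 0 = 800 from rfl, if_pos (by omega)]
    rw [pvBisect_done r 5 8 8 (by norm_num)]

lemma pvTable_contains (r : Int) (h : pvTable.contains r = true) :
    r = 100 ∨ r = 150 ∨ r = 200 ∨ r = 225 ∨ r = 260 ∨ r = 400 ∨ r = 600 ∨ r = 800 := by
  rw [show pvTable = PySem.Dict.mk
    [(100, "1 AWG"), (150, "2/0 AWG"), (200, "3/0 AWG"), (225, "4/0 AWG"),
     (260, "350 kcmil"), (400, "600 kcmil"), (600, "2x 350 kcmil"), (800, "2x 500 kcmil")] from rfl] at h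
  simp [PySem.Dict.contains_mk] at h
  omega

-- ===== VERDICT (by name: the statement is the Claim_ definition above) =====
set_option maxHeartbeats 1000000 in
theorem get_conductor_size_spec : Claim_equal_get_conductor_size := by
  intro r _
  unfold Spec_get_conductor_size get_conductor_size get_conductor_size_alt
  rw [show pvSortedKeys.length = 8 from by decide, pvBisect_eval]
  by_cases h : pvTable.contains r = true
  · rcases pvTable_contains r h with rfl|rfl|rfl|rfl|rfl|rfl|rfl|rfl <;> rfl
  · rw [if_neg h, show PySem.List.sorted pvTable.keys (fun x => x) false = pvSortedKeys from rfl,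
      pvSortedKeys_eq]
    by_cases h1000 : r ≥ 1000
    · rw [if_pos h1000, if_pos h1000]
    · rw [if_neg h1000, if_neg h1000]
      by_cases c0 : r ≤ 100
      · rw [pvFindLoop, if_pos (by omega)]
        rw [show (if r ≤ 100 then (0:Nat) else if r ≤ 150 then 1 else if r ≤ 200 then 2 else if r ≤ 225 then 3 else if r ≤ 260 then 4 else if r ≤ 400 then 5 else if r ≤ 600 then 6 else if r ≤ 800 then 7 else 8) = 0 from by split_ifs; omega]
        rfl
      · by_cases c1 : r ≤ 150
        · rw [pvFindLoop, if_neg (by omega)]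
          rw [pvFindLoop, if_pos (by omega)]
          rw [show (if r ≤ 100 then (0:Nat) else if r ≤ 150 then 1 else if r ≤ 200 then 2 else if r ≤ 225 then 3 else if r ≤ 260 then 4 else if r ≤ 400 then 5 else if r ≤ 600 then 6 else if r ≤ 800 then 7 else 8) = 1 from by split_ifs; omega]
          rfl
        · by_cases c2 : r ≤ 200
          · rw [pvFindLoop, if_neg (by omega)]
            rw [pvFindLoop, if_neg (by omega)]
            rw [pvFindLoop, if_pos (by omega)]
            rw [show (if r ≤ 100 then (0:Nat) else if r ≤ 150 then 1 else if r ≤ 200 then 2 else if r ≤ 225 then 3 else if r ≤ 260 then 4 else if r ≤ 400 then 5 else if r ≤ 600 then 6 else if r ≤ 800 then 7 else 8) = 2 from by split_ifs; omega]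
            rfl
          · by_cases c3 : r ≤ 225
            · rw [pvFindLoop, if_neg (by omega)]
              rw [pvFindLoop, if_neg (by omega)]
              rw [pvFindLoop, if_neg (by omega)]
              rw [pvFindLoop, if_pos (by omega)]
              rw [show (if r ≤ 100 then (0:Nat) else if r ≤ 150 then 1 else if r ≤ 200 then 2 else if r ≤ 225 then 3 else if r ≤ 260 then 4 else if r ≤ 400 then 5 else if r ≤ 600 then 6 else if r ≤ 800 then 7 else 8) = 3 from by split_ifs; omega]
              rfl
            · by_cases c4 : r ≤ 260
              · rw [pvFindLoop, if_neg (by omega)]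
                rw [pvFindLoop, if_neg (by omega)]
                rw [pvFindLoop, if_neg (by omega)]
                rw [pvFindLoop, if_neg (by omega)]
                rw [pvFindLoop, if_pos (by omega)]
                rw [show (if r ≤ 100 then (0:Nat) else if r ≤ 150 then 1 else if r ≤ 200 then 2 else if r ≤ 225 then 3 else if r ≤ 260 then 4 else if r ≤ 400 then 5 else if r ≤ 600 then 6 else if r ≤ 800 then 7 else 8) = 4 from by split_ifs; omega]
                rfl
              · by_cases c5 : r ≤ 400
                · rw [pvFindLoop, if_neg (by omega)]
                  rw [pvFindLoop, if_neg (by omega)]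
                  rw [pvFindLoop, if_neg (by omega)]
                  rw [pvFindLoop, if_neg (by omega)]
                  rw [pvFindLoop, if_neg (by omega)]
                  rw [pvFindLoop, if_pos (by omega)]
                  rw [show (if r ≤ 100 then (0:Nat) else if r ≤ 150 then 1 else if r ≤ 200 then 2 else if r ≤ 225 then 3 else if r ≤ 260 then 4 else if r ≤ 400 then 5 else if r ≤ 600 then 6 else if r ≤ 800 then 7 else 8) = 5 from by split_ifs; omega]
                  rfl
                · by_cases c6 : r ≤ 600
                  · rw [pvFindLoop, if_neg (by omega)]
                    rw [pvFindLoop, if_neg (by omega)]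
                    rw [pvFindLoop, if_neg (by omega)]
                    rw [pvFindLoop, if_neg (by omega)]
                    rw [pvFindLoop, if_neg (by omega)]
                    rw [pvFindLoop, if_neg (by omega)]
                    rw [pvFindLoop, if_pos (by omega)]
                    rw [show (if r ≤ 100 then (0:Nat) else if r ≤ 150 then 1 else if r ≤ 200 then 2 else if r ≤ 225 then 3 else if r ≤ 260 then 4 else if r ≤ 400 then 5 else if r ≤ 600 then 6 else if r ≤ 800 then 7 else 8) = 6 from by split_ifs; omega]
                    rfl
                  · by_cases c7 : r ≤ 800
                    · rw [pvFindLoop, if_neg (by omega)]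
                      rw [pvFindLoop, if_neg (by omega)]
                      rw [pvFindLoop, if_neg (by omega)]
                      rw [pvFindLoop, if_neg (by omega)]
                      rw [pvFindLoop, if_neg (by omega)]
                      rw [pvFindLoop, if_neg (by omega)]
                      rw [pvFindLoop, if_neg (by omega)]
                      rw [pvFindLoop, if_pos (by omega)]
                      rw [show (if r ≤ 100 then (0:Nat) else if r ≤ 150 then 1 else if r ≤ 200 then 2 else if r ≤ 225 then 3 else if r ≤ 260 then 4 else if r ≤ 400 then 5 else if r ≤ 600 then 6 else if r ≤ 800 then 7 else 8) = 7 from by split_ifs; omega]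
                      rfl
                    · rw [pvFindLoop, if_neg (by omega)]
                      rw [pvFindLoop, if_neg (by omega)]
                      rw [pvFindLoop, if_neg (by omega)]
                      rw [pvFindLoop, if_neg (by omega)]
                      rw [pvFindLoop, if_neg (by omega)]
                      rw [pvFindLoop, if_neg (by omega)]
                      rw [pvFindLoop, if_neg (by omega)]
                      rw [pvFindLoop, if_neg (by omega)]
                      rw [pvFindLoop]
                      rw [show (if r ≤ 100 then (0:Nat) else if r ≤ 150 then 1 else if r ≤ 200 then 2 else if r ≤ 225 then 3 else if r ≤ 260 then 4 else if r ≤ 400 then 5 else if r ≤ 600 then 6 else if r ≤ 800 then 7 else 8) = 8 from by split_ifs; omega]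
                      rfl
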